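-- pv_equiv track=rewrite | github.com/AraboMardelli/yoyoxcloud-telegram-bot | scr/license_manager.py | validate_key_format
-- ===== SOURCE A (Python) =====
-- def validate_key_format(key):
--     """Check if key matches expected format: XXXXX-XXXXX-XXXXX-XXXXX-XXXXX (25 chars)"""
--     if not key:
--         return False
--
--     # Remove any whitespace
--     key = key.strip().upper()
--
--     # Check total length (25 chars + 4 dashes = 29)
--     if len(key) != 29:
--         return False
--
--     parts = key.split('-')
--     if len(parts) != 5:
--         return False
--
--     for part in parts:
--         if len(part) != 5 or not part.isalnum():
--             return False
--
--     return True
-- ===== SOURCE B (Python) =====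
-- def validate_key_format(key):
--     """Check if key matches expected format: XXXXX-XXXXX-XXXXX-XXXXX-XXXXX (25 chars)"""
--     if not key:
--         return False
--
--     key = key.strip().upper()
--
--     if len(key) != 29:
--         return False
--
--     DASHES = {5, 11, 17, 23}
--     for i, c in enumerate(key):
--         if i in DASHES:
--             if c != '-':
--                 return False
--         elif not c.isalnum():
--             return False
--     return True
-- ===== Notes on version B (the rewrite author's own statement) =====
-- stated objective: alternative
-- what changed: Replaces the dash-split plus per-part validation loop by a single positional scan of the 29 characters against the fixed set of dash indices {5, 11, 17, 23}, with early exit on the first violation.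
import Mathlib
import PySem

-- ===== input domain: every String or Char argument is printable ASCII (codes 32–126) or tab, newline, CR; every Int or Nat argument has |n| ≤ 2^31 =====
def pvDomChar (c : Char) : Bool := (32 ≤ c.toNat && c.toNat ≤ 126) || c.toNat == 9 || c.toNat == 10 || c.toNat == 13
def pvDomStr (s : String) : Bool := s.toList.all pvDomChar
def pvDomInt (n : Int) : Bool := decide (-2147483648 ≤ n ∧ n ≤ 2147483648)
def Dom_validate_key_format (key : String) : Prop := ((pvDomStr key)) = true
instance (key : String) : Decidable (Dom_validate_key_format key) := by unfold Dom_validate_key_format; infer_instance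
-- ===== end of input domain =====

-- B replaces split('-') + per-part loop by a single positional scan with fixed dash positions; same cost, different decomposition.


-- ===== PORT A =====
def validate_key_format (key : String) : Bool :=
  if key = "" then false
  else
    let k := PySem.Chars.upper (PySem.Chars.strip key.toList)
    if k.length ≠ 29 then false
    else
      let parts := PySem.Chars.splitOn k ['-']
      if parts.length ≠ 5 then false
      else parts.all (fun p => decide (p.length = 5) && PySem.Chars.strIsalnum p)

-- ===== PORT B =====
-- the `for i, c in enumerate(key)` loop of Source B with its early returns
def vkfScan : Int → List Char → Bool
  | _, [] => true
  | i, c :: rest =>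
    if i = 5 ∨ i = 11 ∨ i = 17 ∨ i = 23 then
      if c ≠ '-' then false else vkfScan (i + 1) rest
    else if ¬ (PySem.Chars.isalnum c = true) then false else vkfScan (i + 1) rest

def validate_key_format_alt (key : String) : Bool :=
  if key = "" then false
  else
    let k := PySem.Chars.upper (PySem.Chars.strip key.toList)
    if k.length ≠ 29 then false
    else vkfScan 0 k

-- ===== PRECONDITION & SPEC =====
def Spec_validate_key_format (key : String) (out : Bool) : Prop := out = validate_key_format_alt key
instance (key : String) (out : Bool) : Decidable (Spec_validate_key_format key out) := by unfold Spec_validate_key_format; infer_instance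

-- ===== CLAIM (what is proved, stated in full; the proofs are below) =====
def Claim_equal_validate_key_format : Prop := ∀ (key : String), Dom_validate_key_format key → Spec_validate_key_format key (validate_key_format key)

-- ===== LEMMAS AND PROOFS =====

-- structural model of key.split('-')
def pvSplit1 : List Char → List (List Char)
  | [] => [[]]
  | c :: rest => if c = '-' then [] :: pvSplit1 rest else (pvSplit1 rest).modifyHead (c :: ·)

-- pattern automaton: k alnum chars due before the next '-', parts of 5, trailing part
def vkfPat : Nat → List Char → Bool
  | _, [] => true
  | 0, c :: rest => decide (c = '-') && vkfPat 5 rest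
  | k + 1, c :: rest => PySem.Chars.isalnum c && vkfPat k rest

theorem pvSplit1_ne_nil (cs : List Char) : pvSplit1 cs ≠ [] := by
  induction cs with
  | nil => simp [pvSplit1]
  | cons c rest ih =>
    simp only [pvSplit1]
    split
    · simp
    · cases h : pvSplit1 rest with
      | nil => exact absurd h ih
      | cons p ps => simp

theorem splitOn_go_eq (fuel : Nat) : ∀ (l cur : List Char) (acc : List (List Char)),
    l.length ≤ fuel →
    PySem.Chars.splitOn.go ['-'] fuel l cur acc
      = acc.reverse ++ (pvSplit1 l).modifyHead (cur.reverse ++ ·) := by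
  induction fuel with
  | zero =>
    intro l cur acc h
    have : l = [] := by cases l <;> simp_all
    subst this
    simp [PySem.Chars.splitOn.go, pvSplit1]
  | succ fuel ih =>
    intro l cur acc h
    cases l with
    | nil => simp [PySem.Chars.splitOn.go, pvSplit1]
    | cons c rest =>
      simp only [PySem.Chars.splitOn.go, List.isPrefixOf]
      by_cases hc : c = '-'
      · subst hc
        simp only [beq_self_eq_true, Bool.and_self, if_pos, List.length_cons,
          List.length_nil, List.drop_succ_cons, List.drop_zero]
        rw [ih rest [] _ (by simpa using Nat.le_of_succ_le_succ h)]
        simp only [pvSplit1, if_pos]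
        cases hs : pvSplit1 rest with
        | nil => exact absurd hs (pvSplit1_ne_nil rest)
        | cons p ps => simp [List.modifyHead]
      · have hbe : ('-' == c) = false := beq_eq_false_iff_ne.mpr (Ne.symm hc)
        rw [if_neg (by simp [hbe])]
        rw [ih rest (c :: cur) acc (by simpa using Nat.le_of_succ_le_succ h)]
        simp only [pvSplit1, if_neg hc]
        cases hs : pvSplit1 rest with
        | nil => exact absurd hs (pvSplit1_ne_nil rest)
        | cons p ps => simp [List.modifyHead]

theorem splitOn_eq_pvSplit1 (cs : List Char) :
    PySem.Chars.splitOn cs ['-'] = pvSplit1 cs := by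
  unfold PySem.Chars.splitOn
  rw [splitOn_go_eq (cs.length + 1) cs [] [] (by omega)]
  cases hs : pvSplit1 cs with
  | nil => exact absurd hs (pvSplit1_ne_nil cs)
  | cons p ps => simp [List.modifyHead]

theorem pvSplit1_no_dash (cs : List Char) (h : ∀ c ∈ cs, c ≠ '-') :
    pvSplit1 cs = [cs] := by
  induction cs with
  | nil => rfl
  | cons c rest ih =>
    simp only [pvSplit1, if_neg (h c (by simp))]
    rw [ih (fun x hx => h x (by simp [hx]))]
    rfl

theorem pvSplit1_append (a b : List Char) (h : ∀ c ∈ a, c ≠ '-') :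
    pvSplit1 (a ++ '-' :: b) = a :: pvSplit1 b := by
  induction a with
  | nil => simp [pvSplit1]
  | cons c a' ih =>
    simp only [List.cons_append, pvSplit1, if_neg (h c (by simp))]
    rw [ih (fun x hx => h x (by simp [hx]))]
    rfl

theorem vkfPat_no_dash (cs : List Char) : ∀ (k : Nat), (∀ c ∈ cs, c ≠ '-') →
    vkfPat k cs = (decide (cs.length ≤ k) && cs.all PySem.Chars.isalnum) := by
  induction cs with
  | nil => intro k _; simp [vkfPat]
  | cons c rest ih =>
    intro k h
    cases k with
    | zero =>
      simp only [vkfPat]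
      simp [h c (by simp)]
    | succ k =>
      simp only [vkfPat]
      rw [ih k (fun x hx => h x (by simp [hx]))]
      simp only [List.all_cons, List.length_cons]
      cases PySem.Chars.isalnum c <;> cases rest.all PySem.Chars.isalnum <;>
        simp <;> try omega

theorem vkfPat_append (a : List Char) : ∀ (k : Nat) (b : List Char), (∀ c ∈ a, c ≠ '-') →
    vkfPat k (a ++ '-' :: b)
      = (decide (a.length = k) && a.all PySem.Chars.isalnum && vkfPat 5 b) := by
  induction a with
  | nil =>
    intro k b _
    cases k with
    | zero => simp [vkfPat]
    | succ k => simp [vkfPat, show PySem.Chars.isalnum '-' = false from by decide]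
  | cons c a' ih =>
    intro k b h
    cases k with
    | zero =>
      simp [vkfPat, h c (by simp)]
    | succ k =>
      simp only [List.cons_append, vkfPat]
      rw [ih k b (fun x hx => h x (by simp [hx]))]
      simp only [List.all_cons, List.length_cons]
      cases PySem.Chars.isalnum c <;>
        cases a'.all PySem.Chars.isalnum <;>
          cases vkfPat 5 b <;> simp <;> try omega

-- every list is dash-free or has a dash-free prefix before its first dash
theorem pvDecomp (cs : List Char) :
    (∀ c ∈ cs, c ≠ '-') ∨ ∃ a b, cs = a ++ '-' :: b ∧ ∀ c ∈ a, c ≠ '-' := by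
  induction cs with
  | nil => left; simp
  | cons c rest ih =>
    by_cases hc : c = '-'
    · right; exact ⟨[], rest, by simp [hc], by simp⟩
    · rcases ih with h | ⟨a, b, rfl, ha⟩
      · left; intro x hx
        rcases List.mem_cons.mp hx with rfl | hx
        · exact hc
        · exact h x hx
      · right
        exact ⟨c :: a, b, by simp, by
          intro x hx
          rcases List.mem_cons.mp hx with rfl | hx
          · exact hc
          · exact ha x hx⟩

def pvGood (p : List Char) : Bool := decide (p.length = 5) && PySem.Chars.strIsalnum p

theorem pvMain (n : Nat) : ∀ (cs : List Char), cs.length = 6 * n + 5 →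
    (decide ((pvSplit1 cs).length = n + 1) && (pvSplit1 cs).all pvGood) = vkfPat 5 cs := by
  induction n with
  | zero =>
    intro cs hlen
    rcases pvDecomp cs with h | ⟨a, b, rfl, ha⟩
    · rw [pvSplit1_no_dash cs h, vkfPat_no_dash cs 5 h]
      have hne : cs ≠ [] := by intro hc; simp [hc] at hlen
      simp [pvGood, PySem.Chars.strIsalnum, hlen, hne]
    · rw [pvSplit1_append a b ha, vkfPat_append a 5 b ha]
      have hl : a.length ≠ 5 := by simp at hlen; omega
      have h2 : decide ((a :: pvSplit1 b).length = 0 + 1) = false := by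
        cases hb : pvSplit1 b with
        | nil => exact absurd hb (pvSplit1_ne_nil b)
        | cons p ps => simp
      have h3 : decide (a.length = 5) = false := by simp [hl]
      simp only [h2, h3, Bool.false_and]
  | succ m ih =>
    intro cs hlen
    rcases pvDecomp cs with h | ⟨a, b, rfl, ha⟩
    · rw [pvSplit1_no_dash cs h, vkfPat_no_dash cs 5 h]
      have h1 : ¬ ([cs].length = m + 1 + 1) := by simp
      have h2 : ¬ (cs.length ≤ 5) := by omega
      simp [h2]
    · rw [pvSplit1_append a b ha, vkfPat_append a 5 b ha]
      by_cases hl : a.length = 5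
      · have hb : b.length = 6 * m + 5 := by simp at hlen; omega
        rw [← ih b hb]
        have hane : (!a.isEmpty) = true := by cases a <;> simp_all
        have hdec : decide ((a :: pvSplit1 b).length = m + 1 + 1)
            = decide ((pvSplit1 b).length = m + 1) := decide_eq_decide.mpr (by simp)
        simp only [List.all_cons, List.length_cons, pvGood, PySem.Chars.strIsalnum, hl,
          hane, hdec]
        -- pure Bool AC rearrangement
        simp [Bool.and_comm, Bool.and_assoc]
      · simp [pvGood, hl]

theorem vkfScan_eq_pat (cs : List Char) : ∀ (i : Nat), i + cs.length ≤ 29 →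
    vkfScan (i : Int) cs = vkfPat (5 - i % 6) cs := by
  induction cs with
  | nil => intro i _; simp [vkfScan, vkfPat]
  | cons c rest ih =>
    intro i h
    simp only [vkfScan]
    have hcast : (i : Int) + 1 = ((i + 1 : Nat) : Int) := by push_cast; ring
    by_cases hd : i % 6 = 5
    · have : (i : Int) = 5 ∨ (i : Int) = 11 ∨ (i : Int) = 17 ∨ (i : Int) = 23 := by
        simp at h
        have : i = 5 ∨ i = 11 ∨ i = 17 ∨ i = 23 := by omega
        rcases this with rfl | rfl | rfl | rfl <;> simp
      rw [if_pos this]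
      have hk : 5 - i % 6 = 0 := by omega
      have hk' : 5 - (i + 1) % 6 = 5 := by omega
      rw [hk]
      by_cases hc : c = '-'
      · simp only [hc, ne_eq, not_true_eq_false, if_false, vkfPat, decide_true,
          Bool.true_and]
        rw [hcast, ih (i + 1) (by simp at h ⊢; omega), hk']
      · simp [vkfPat, hc]
    · have hni : ¬ ((i : Int) = 5 ∨ (i : Int) = 11 ∨ (i : Int) = 17 ∨ (i : Int) = 23) := by
        omega
      rw [if_neg hni]
      have hk : ∃ j, 5 - i % 6 = j + 1 := ⟨4 - i % 6, by omega⟩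
      rcases hk with ⟨j, hj⟩
      have hj' : 5 - (i + 1) % 6 = j := by omega
      rw [hj]
      by_cases hc : PySem.Chars.isalnum c = true
      · simp only [hc, not_true_eq_false, if_false, vkfPat, Bool.true_and]
        rw [hcast, ih (i + 1) (by simp at h ⊢; omega), hj']
      · simp only [vkfPat]
        simp [hc]

-- ===== VERDICT (by name: the statement is the Claim_ definition above) =====
theorem validate_key_format_spec : Claim_equal_validate_key_format := by
  intro key _
  unfold Spec_validate_key_format validate_key_format validate_key_format_alt
  by_cases h0 : key = ""
  · simp [h0]
  · simp only [if_neg h0]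
    set k := PySem.Chars.upper (PySem.Chars.strip key.toList) with hk
    by_cases hlen : k.length = 29
    · simp only [hlen, ne_eq, not_true_eq_false, if_false]
      rw [splitOn_eq_pvSplit1 k]
      have hmain := pvMain 4 k (by omega)
      have hscan := vkfScan_eq_pat k 0 (by omega)
      simp only [Nat.zero_mod, Nat.sub_zero] at hscan
      rw [show ((0 : Nat) : Int) = 0 from rfl] at hscan
      rw [hscan, ← hmain]
      by_cases hp : (pvSplit1 k).length = 5
      · simp only [hp, not_true_eq_false, if_false, decide_true, Bool.true_and]
        rfl
      · simp [hp]
    · simp [hlen]
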